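-- pv_equiv track=rewrite | github.com/eileenwang1/Python-Prolog-Interpreter | proof_constructor/add_proof_tree.py | split_head_tail
-- ===== SOURCE A (Python) =====
-- def split_head_tail(rule):
--     # split the head text and the tail texts of a rule text
--     # String -> (String,[String])
--     cut_idx = rule.find(":-")
--     if cut_idx==-1:
--         return (rule,[])
--     head = rule[:cut_idx].strip()
--     tail = rule[cut_idx+2:].strip()
--     if tail == "TRUE":
--         return(head,[])
--     tail_list = []
--     pda_counter = 0
--     prev_idx = 0
--     for i in range(len(tail)):
--         if tail[i]=='(':
--             pda_counter +=1
--         elif tail[i]==')':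
--             pda_counter -=1
--         elif tail[i] == ',' and pda_counter ==0:
--             tail_list.append(tail[prev_idx:i])
--             prev_idx = i+1
--     tail_list.append(tail[prev_idx:])
--     tail_list = [i.strip() for i in tail_list]
--     return (head,tail_list)
-- ===== SOURCE B (Python) =====
-- def split_head_tail(rule):
--     # split the head text and the tail texts of a rule text
--     # String -> (String,[String])
--     cut_idx = rule.find(":-")
--     if cut_idx == -1:
--         return (rule, [])
--     head = rule[:cut_idx].strip()
--     tail = rule[cut_idx+2:].strip()
--     if tail == "TRUE":
--         return (head, [])
--     tail_list = []
--     buf = []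
--     depth = 0
--     for piece in tail.split(','):
--         buf.append(piece)
--         depth += piece.count('(') - piece.count(')')
--         if depth == 0:
--             tail_list.append(','.join(buf).strip())
--             buf = []
--     if buf:
--         tail_list.append(','.join(buf).strip())
--     return (head, tail_list)
-- ===== Notes on version B (the rewrite author's own statement) =====
-- stated objective: alternative
-- what changed: Replaces the index-based character scan (manual pda counter with slice bookkeeping via prev_idx) by splitting the tail once at every comma and re-merging pieces with a running paren balance, flushing a joined buffer whenever the balance returns to zero.
import Mathlib
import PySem

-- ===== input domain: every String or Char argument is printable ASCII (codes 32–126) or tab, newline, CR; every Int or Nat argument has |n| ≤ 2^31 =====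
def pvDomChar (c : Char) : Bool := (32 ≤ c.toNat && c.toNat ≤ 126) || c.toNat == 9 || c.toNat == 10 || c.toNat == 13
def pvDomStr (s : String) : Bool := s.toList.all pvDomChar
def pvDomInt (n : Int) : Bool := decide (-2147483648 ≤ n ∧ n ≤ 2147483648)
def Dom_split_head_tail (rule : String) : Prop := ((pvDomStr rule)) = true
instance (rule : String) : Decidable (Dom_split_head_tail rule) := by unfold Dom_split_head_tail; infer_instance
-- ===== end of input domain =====

-- B replaces A's index-based character scan (pda counter + prev_idx slice bookkeeping) by splitting
-- the tail once at every comma and re-merging pieces with a running paren balance; same cost, different decomposition.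

-- ===== PORT A =====
def split_head_tail (rule : String) : String × List String :=
  let cut_idx := PySem.Str.find rule ":-"
  if cut_idx == -1 then (rule, [])
  else
    let head := PySem.Str.strip (PySem.Str.slice rule none (some cut_idx))
    let tail := PySem.Str.strip (PySem.Str.slice rule (some (cut_idx + 2)) none)
    if tail == "TRUE" then (head, [])
    else
      let st := (PySem.List.pyRange 0 (PySem.Str.len tail) 1).foldl
        (fun (s : List String × Int × Int) i =>
          if (PySem.Str.pyGet? tail i).getD ' ' == '(' then (s.1, s.2.1 + 1, s.2.2)
          else if (PySem.Str.pyGet? tail i).getD ' ' == ')' then (s.1, s.2.1 - 1, s.2.2)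
          else if (PySem.Str.pyGet? tail i).getD ' ' == ',' && s.2.1 == 0 then
            (s.1 ++ [PySem.Str.slice tail (some s.2.2) (some i)], s.2.1, i + 1)
          else s) ([], 0, 0)
      let tail_list := st.1 ++ [PySem.Str.slice tail (some st.2.2) none]
      (head, tail_list.map PySem.Str.strip)

-- ===== PORT B =====
def split_head_tail_alt (rule : String) : String × List String :=
  let cut_idx := PySem.Str.find rule ":-"
  if cut_idx == -1 then (rule, [])
  else
    let head := PySem.Str.strip (PySem.Str.slice rule none (some cut_idx))
    let tail := PySem.Str.strip (PySem.Str.slice rule (some (cut_idx + 2)) none)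
    if tail == "TRUE" then (head, [])
    else
      let st := ((PySem.Str.split? tail ",").getD []).foldl
        (fun (s : List String × List String × Int) piece =>
          let buf := s.2.1 ++ [piece]
          let depth := s.2.2 + (PySem.Str.count piece "(" : Int) - (PySem.Str.count piece ")" : Int)
          if depth == 0 then (s.1 ++ [PySem.Str.strip (PySem.Str.join "," buf)], [], depth)
          else (s.1, buf, depth)) ([], [], 0)
      let tail_list :=
        if st.2.1 ≠ [] then st.1 ++ [PySem.Str.strip (PySem.Str.join "," st.2.1)] else st.1
      (head, tail_list)

-- ===== PRECONDITION & SPEC =====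
def Spec_split_head_tail (rule : String) (out : String × List String) : Prop := out = split_head_tail_alt rule
instance (rule : String) (out : String × List String) : Decidable (Spec_split_head_tail rule out) := by unfold Spec_split_head_tail; infer_instance

-- ===== CLAIM (what is proved, stated in full; the proofs are below) =====
def Claim_equal_split_head_tail : Prop := ∀ (rule : String), Dom_split_head_tail rule → Spec_split_head_tail rule (split_head_tail rule)

-- ===== LEMMAS AND PROOFS =====

-- depth contribution of a chunk of characters: '(' count minus ')' count
def pvBal (l : List Char) : Int := (l.count '(' : Int) - (l.count ')' : Int)

-- reference splitter: the segments of a char list between top-level commas (A's semantics)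
def pvSegs : List Char → Int → List Char → List (List Char)
  | [], _, cur => [cur]
  | c :: cs, d, cur =>
    if c = '(' then pvSegs cs (d + 1) (cur ++ [c])
    else if c = ')' then pvSegs cs (d - 1) (cur ++ [c])
    else if c = ',' ∧ d = 0 then cur :: pvSegs cs d []
    else pvSegs cs d (cur ++ [c])

-- structural version of splitting on every ','
def pvSplit : List Char → List Char → List (List Char)
  | [], cur => [cur]
  | c :: cs, cur => if c = ',' then cur :: pvSplit cs [] else pvSplit cs (cur ++ [c])

-- A's loop body, abstracted over the (index, char) pair
def pvF (t : List Char) (s : List String × Int × Int) (p : Int × Char) : List String × Int × Int :=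
  if p.2 == '(' then (s.1, s.2.1 + 1, s.2.2)
  else if p.2 == ')' then (s.1, s.2.1 - 1, s.2.2)
  else if p.2 == ',' && s.2.1 == 0 then
    (s.1 ++ [String.ofList (PySem.List.slice t (some s.2.2) (some p.1))], s.2.1, p.1 + 1)
  else s

-- B's loop body at the char-list level
def pvG (s : List String × List (List Char) × Int) (piece : List Char) : List String × List (List Char) × Int :=
  if s.2.2 + pvBal piece = 0 then
    (s.1 ++ [String.ofList (PySem.Chars.strip (List.intercalate [','] (s.2.1 ++ [piece])))], [],
      s.2.2 + pvBal piece)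
  else (s.1, s.2.1 ++ [piece], s.2.2 + pvBal piece)

theorem pvBal_nil : pvBal [] = 0 := by simp [pvBal]

theorem pvBal_append (a b : List Char) : pvBal (a ++ b) = pvBal a + pvBal b := by
  simp [pvBal, List.count_append]; ring

theorem pvBal_open : pvBal ['('] = 1 := by decide

theorem pvBal_close : pvBal [')'] = -1 := by decide

theorem pvBal_other (c : Char) (h1 : c ≠ '(') (h2 : c ≠ ')') : pvBal [c] = 0 := by
  simp [pvBal, h1, h2]

theorem pvSplit_go (l : List Char) : ∀ (fuel : Nat) (cur : List Char) (acc : List (List Char)),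
    l.length < fuel →
    PySem.Chars.splitOn.go [','] fuel l cur acc = acc.reverse ++ pvSplit l cur.reverse := by
  induction l with
  | nil =>
    intro fuel cur acc h
    obtain ⟨f, rfl⟩ : ∃ f, fuel = f + 1 := ⟨fuel - 1, by omega⟩
    simp [PySem.Chars.splitOn.go, pvSplit]
  | cons c cs ih =>
    intro fuel cur acc h
    obtain ⟨f, rfl⟩ : ∃ f, fuel = f + 1 := ⟨fuel - 1, by omega⟩
    by_cases hc : c = ','
    · subst hc
      rw [show PySem.Chars.splitOn.go [','] (f + 1) (',' :: cs) cur acc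
          = PySem.Chars.splitOn.go [','] f cs [] (cur.reverse :: acc) by
        simp [PySem.Chars.splitOn.go, List.isPrefixOf]]
      rw [ih f [] (cur.reverse :: acc) (by simp at h; omega)]
      simp [pvSplit]
    · rw [show PySem.Chars.splitOn.go [','] (f + 1) (c :: cs) cur acc
          = PySem.Chars.splitOn.go [','] f cs (c :: cur) acc by
        simp [PySem.Chars.splitOn.go, List.isPrefixOf, Ne.symm hc]]
      rw [ih f (c :: cur) acc (by simp at h; omega)]
      simp [pvSplit, hc]

theorem splitOn_comma (t : List Char) : PySem.Chars.splitOn t [','] = pvSplit t [] := by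
  rw [PySem.Chars.splitOn, pvSplit_go t (t.length + 1) [] [] (by omega)]
  simp

theorem count_go (c0 : Char) (l : List Char) : ∀ (fuel : Nat) (acc : Nat), l.length ≤ fuel →
    PySem.Chars.count.go [c0] fuel l acc = acc + l.count c0 := by
  induction l with
  | nil =>
    intro fuel acc h
    cases fuel <;> simp [PySem.Chars.count.go]
  | cons c cs ih =>
    intro fuel acc h
    simp only [List.length_cons] at h
    obtain ⟨f, rfl⟩ : ∃ f, fuel = f + 1 := ⟨fuel - 1, by omega⟩
    by_cases hc : c0 = c
    · subst hc
      rw [show PySem.Chars.count.go [c0] (f + 1) (c0 :: cs) acc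
            = PySem.Chars.count.go [c0] f cs (acc + 1) by
          simp [PySem.Chars.count.go, List.isPrefixOf]]
      rw [ih f (acc + 1) (by omega)]
      simp
      omega
    · rw [show PySem.Chars.count.go [c0] (f + 1) (c :: cs) acc
            = PySem.Chars.count.go [c0] f cs acc by
          simp [PySem.Chars.count.go, List.isPrefixOf, hc]]
      rw [ih f acc (by omega)]
      simp [Ne.symm hc]

theorem count_single (l : List Char) (c0 : Char) : PySem.Chars.count l [c0] = l.count c0 := by
  rw [PySem.Chars.count]
  simp [count_go c0 l l.length 0 le_rfl]

theorem inter_cons (sep x : List Char) (xs : List (List Char)) (h : xs ≠ []) :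
    List.intercalate sep (x :: xs) = x ++ sep ++ List.intercalate sep xs := by
  obtain ⟨y, ys, rfl⟩ := List.exists_cons_of_ne_nil h
  simp [List.intercalate, List.intersperse]

theorem inter_append_last (sep : List Char) (buf : List (List Char)) (cur x : List Char) :
    List.intercalate sep (buf ++ [cur ++ x]) = List.intercalate sep (buf ++ [cur]) ++ x := by
  induction buf with
  | nil => simp [List.intercalate]
  | cons b bs ih =>
    rw [List.cons_append, List.cons_append, inter_cons sep b _ (by simp),
      inter_cons sep b _ (by simp), ih]
    simp

theorem inter_append_sep (sep : List Char) (buf : List (List Char)) (h : buf ≠ []) :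
    List.intercalate sep (buf ++ [[]]) = List.intercalate sep buf ++ sep := by
  induction buf with
  | nil => exact absurd rfl h
  | cons b bs ih =>
    cases bs with
    | nil => simp [List.intercalate, List.intersperse]
    | cons y ys =>
      rw [List.cons_append, inter_cons sep b _ (by simp), inter_cons sep b _ (by simp),
        ih (by simp)]
      simp

theorem A_enum (t : List Char) : ∀ (rest u : List Char) (acc : List String) (p : Nat),
    t = u ++ rest → p ≤ u.length →
    (let st := (PySem.List.enumerate rest (u.length : Int)).foldl (pvF t)
        (acc, pvBal (u.drop p), (p : Int));
      st.1 ++ [String.ofList (PySem.List.slice t (some st.2.2) none)])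
    = acc ++ (pvSegs rest (pvBal (u.drop p)) (u.drop p)).map String.ofList := by
  intro rest
  induction rest with
  | nil =>
    intro u acc p ht hp
    subst ht
    simp [pvSegs, PySem.List.enumerate_nil, PySem.List.slice_from_natCast]
  | cons c cs ih =>
    intro u acc p ht hp
    dsimp only
    rw [PySem.List.enumerate_cons, List.foldl_cons]
    by_cases hc1 : c = '('
    · subst hc1
      rw [show pvF t (acc, pvBal (u.drop p), (p : Int)) ((u.length : Int), '(')
            = (acc, pvBal (u.drop p) + 1, (p : Int)) by simp [pvF]]
      have h3 := ih (u ++ ['(']) acc p (by simpa [List.append_assoc] using ht)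
        (by simp; omega)
      simp only [List.length_append, List.length_cons, List.length_nil,
        List.drop_append_of_le_length hp, pvBal_append, pvBal_open] at h3
      push_cast at h3
      rw [show pvSegs ('(' :: cs) (pvBal (u.drop p)) (u.drop p)
            = pvSegs cs (pvBal (u.drop p) + 1) (u.drop p ++ ['(']) by simp [pvSegs]]
      exact h3
    · by_cases hc2 : c = ')'
      · subst hc2
        rw [show pvF t (acc, pvBal (u.drop p), (p : Int)) ((u.length : Int), ')')
              = (acc, pvBal (u.drop p) - 1, (p : Int)) by simp [pvF]]
        have h3 := ih (u ++ [')']) acc p (by simpa [List.append_assoc] using ht)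
          (by simp; omega)
        simp only [List.length_append, List.length_cons, List.length_nil,
          List.drop_append_of_le_length hp, pvBal_append, pvBal_close] at h3
        push_cast at h3
        rw [show pvSegs (')' :: cs) (pvBal (u.drop p)) (u.drop p)
              = pvSegs cs (pvBal (u.drop p) - 1) (u.drop p ++ [')']) by simp [pvSegs]]
        rw [show pvBal (u.drop p) + -1 = pvBal (u.drop p) - 1 by ring] at h3
        exact h3
      · by_cases hc3 : c = ',' ∧ pvBal (u.drop p) = 0
        · obtain ⟨rfl, hb⟩ := hc3
          rw [show pvF t (acc, pvBal (u.drop p), (p : Int)) ((u.length : Int), ',')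
                = (acc ++ [String.ofList (PySem.List.slice t (some (p : Int)) (some (u.length : Int)))],
                    pvBal (u.drop p), (u.length : Int) + 1) by simp [pvF, hb]]
          have hslice : PySem.List.slice t (some (p : Int)) (some (u.length : Int)) = u.drop p := by
            subst ht
            rw [PySem.List.slice_natCast, List.drop_append_of_le_length hp]
            rw [show u.length - p = (u.drop p).length by simp]
            exact List.take_left
          rw [hslice, hb]
          have hdrop : (u ++ [',']).drop (u.length + 1) = [] := by
            rw [show u.length + 1 = (u ++ [',']).length by simp]
            exact List.drop_length
          have h3 := ih (u ++ [',']) (acc ++ [String.ofList (u.drop p)]) (u.length + 1)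
            (by simpa [List.append_assoc] using ht) (by simp)
          simp only [hdrop, pvBal_nil, List.length_append, List.length_cons,
            List.length_nil] at h3
          push_cast at h3
          rw [show pvSegs (',' :: cs) 0 (u.drop p) = (u.drop p) :: pvSegs cs 0 [] by
            simp [pvSegs]]
          rw [h3]
          simp
        · have hcc : (c == ',' && pvBal (u.drop p) == 0) = false := by
            rcases not_and_or.mp hc3 with h | h <;> simp [h]
          rw [show pvF t (acc, pvBal (u.drop p), (p : Int)) ((u.length : Int), c)
                = (acc, pvBal (u.drop p), (p : Int)) by simp [pvF, hc1, hc2, hcc]]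
          have h3 := ih (u ++ [c]) acc p (by simpa [List.append_assoc] using ht)
            (by simp; omega)
          simp only [List.length_append, List.length_cons, List.length_nil,
            List.drop_append_of_le_length hp, pvBal_append,
            pvBal_other c hc1 hc2, add_zero] at h3
          push_cast at h3
          rw [show pvSegs (c :: cs) (pvBal (u.drop p)) (u.drop p)
                = pvSegs cs (pvBal (u.drop p)) (u.drop p ++ [c]) by
              simp [pvSegs, hc1, hc2, hc3]]
          exact h3

theorem B_gen : ∀ (rest cur : List Char) (acc : List String) (buf : List (List Char)) (d : Int),
    (let st := (pvSplit rest cur).foldl pvG (acc, buf, d);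
      if st.2.1 ≠ [] then
        st.1 ++ [String.ofList (PySem.Chars.strip (List.intercalate [','] st.2.1))]
      else st.1)
    = acc ++ (pvSegs rest (d + pvBal cur) (List.intercalate [','] (buf ++ [cur]))).map
        (fun l => String.ofList (PySem.Chars.strip l)) := by
  intro rest
  induction rest with
  | nil =>
    intro cur acc buf d
    dsimp only
    by_cases hb : d + pvBal cur = 0
    · simp [pvSplit, pvG, pvSegs, hb]
    · simp [pvSplit, pvG, pvSegs, hb]
  | cons c cs ih =>
    intro cur acc buf d
    by_cases hc : c = ','
    · subst hc
      dsimp only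
      rw [show pvSplit (',' :: cs) cur = cur :: pvSplit cs [] by simp [pvSplit]]
      rw [List.foldl_cons]
      by_cases hb : d + pvBal cur = 0
      · rw [show pvG (acc, buf, d) cur
              = (acc ++ [String.ofList (PySem.Chars.strip (List.intercalate [','] (buf ++ [cur])))],
                  [], d + pvBal cur) by simp [pvG, hb]]
        have h3 := ih [] (acc ++ [String.ofList (PySem.Chars.strip (List.intercalate [','] (buf ++ [cur])))]) [] (d + pvBal cur)
        simp only [pvBal_nil, add_zero, List.nil_append,
          show List.intercalate [','] [([] : List Char)] = [] by
            simp [List.intercalate, List.intersperse]] at h3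
        rw [h3]
        rw [show pvSegs (',' :: cs) (d + pvBal cur) (List.intercalate [','] (buf ++ [cur]))
              = List.intercalate [','] (buf ++ [cur])
                  :: pvSegs cs (d + pvBal cur) [] by simp [pvSegs, hb]]
        rw [hb]
        simp
      · rw [show pvG (acc, buf, d) cur = (acc, buf ++ [cur], d + pvBal cur) by simp [pvG, hb]]
        have h3 := ih [] acc (buf ++ [cur]) (d + pvBal cur)
        simp only [pvBal_nil, add_zero,
          inter_append_sep [','] (buf ++ [cur]) (by simp)] at h3
        rw [h3]
        rw [show pvSegs (',' :: cs) (d + pvBal cur) (List.intercalate [','] (buf ++ [cur]))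
              = pvSegs cs (d + pvBal cur) (List.intercalate [','] (buf ++ [cur]) ++ [',']) by
            simp [pvSegs, hb]]
    · dsimp only
      rw [show pvSplit (c :: cs) cur = pvSplit cs (cur ++ [c]) by simp [pvSplit, hc]]
      have h3 := ih (cur ++ [c]) acc buf d
      simp only [pvBal_append, inter_append_last, ← add_assoc] at h3
      rw [h3]
      by_cases hc1 : c = '('
      · subst hc1
        rw [show pvSegs ('(' :: cs) (d + pvBal cur) (List.intercalate [','] (buf ++ [cur]))
              = pvSegs cs (d + pvBal cur + 1) (List.intercalate [','] (buf ++ [cur]) ++ ['(']) by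
            simp [pvSegs]]
        rw [pvBal_open]
      · by_cases hc2 : c = ')'
        · subst hc2
          rw [show pvSegs (')' :: cs) (d + pvBal cur) (List.intercalate [','] (buf ++ [cur]))
                = pvSegs cs (d + pvBal cur - 1) (List.intercalate [','] (buf ++ [cur]) ++ [')']) by
              simp [pvSegs]]
          rw [pvBal_close]
          ring_nf
        · rw [show pvSegs (c :: cs) (d + pvBal cur) (List.intercalate [','] (buf ++ [cur]))
                = pvSegs cs (d + pvBal cur) (List.intercalate [','] (buf ++ [cur]) ++ [c]) by
              simp [pvSegs, hc1, hc2, hc]]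
          rw [pvBal_other c hc1 hc2]
          ring_nf

theorem B_map (pieces : List (List Char)) : ∀ (acc : List String) (buf : List (List Char)) (d : Int),
    (pieces.map String.ofList).foldl
      (fun (s : List String × List String × Int) piece =>
        let buf := s.2.1 ++ [piece]
        let depth := s.2.2 + (PySem.Str.count piece "(" : Int) - (PySem.Str.count piece ")" : Int)
        if depth == 0 then (s.1 ++ [PySem.Str.strip (PySem.Str.join "," buf)], [], depth)
        else (s.1, buf, depth)) (acc, buf.map String.ofList, d)
    = (fun s => (s.1, s.2.1.map String.ofList, s.2.2)) (pieces.foldl pvG (acc, buf, d)) := by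
  induction pieces with
  | nil => intro acc buf d; rfl
  | cons pc ps ih =>
    intro acc buf d
    rw [List.map_cons, List.foldl_cons, List.foldl_cons]
    have hcnt : ∀ sub : String, PySem.Str.count (String.ofList pc) sub
        = PySem.Chars.count pc sub.toList := by
      intro sub; rw [PySem.Str.count_eq, String.toList_ofList]
    have hstep : ((if (d + (PySem.Str.count (String.ofList pc) "(" : Int)
              - (PySem.Str.count (String.ofList pc) ")" : Int) == 0)
            then (acc ++ [PySem.Str.strip (PySem.Str.join "," (buf.map String.ofList ++ [String.ofList pc]))],
                ([] : List String),
                d + (PySem.Str.count (String.ofList pc) "(" : Int) - (PySem.Str.count (String.ofList pc) ")" : Int))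
            else (acc, buf.map String.ofList ++ [String.ofList pc],
                d + (PySem.Str.count (String.ofList pc) "(" : Int) - (PySem.Str.count (String.ofList pc) ")" : Int)))
          : List String × List String × Int)
        = (fun s => (s.1, s.2.1.map String.ofList, s.2.2)) (pvG (acc, buf, d) pc) := by
      have hdep : d + (PySem.Str.count (String.ofList pc) "(" : Int)
          - (PySem.Str.count (String.ofList pc) ")" : Int) = d + pvBal pc := by
        rw [hcnt, hcnt]
        rw [show ("(" : String).toList = ['('] from rfl, show (")" : String).toList = [')'] from rfl]
        rw [count_single, count_single, pvBal]
        ring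
      rw [hdep]
      have hflush : PySem.Str.strip (PySem.Str.join "," (buf.map String.ofList ++ [String.ofList pc]))
          = String.ofList (PySem.Chars.strip (List.intercalate [','] (buf ++ [pc]))) := by
        rw [PySem.Str.strip, PySem.Str.toList_join]
        congr 1
        rw [show ("," : String).toList = [','] from rfl]
        rw [PySem.Chars.join]
        congr 1
        simp [List.map_map, Function.comp_def]
      by_cases hd : d + pvBal pc = 0
      · simp [pvG, hd, hflush]
      · simp [pvG, hd]
    dsimp only
    rw [hstep]
    exact ih _ _ _

theorem A_bridge (tailS : String) :
    (PySem.List.pyRange 0 (PySem.Str.len tailS) 1).foldl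
      (fun (s : List String × Int × Int) i =>
        if (PySem.Str.pyGet? tailS i).getD ' ' == '(' then (s.1, s.2.1 + 1, s.2.2)
        else if (PySem.Str.pyGet? tailS i).getD ' ' == ')' then (s.1, s.2.1 - 1, s.2.2)
        else if (PySem.Str.pyGet? tailS i).getD ' ' == ',' && s.2.1 == 0 then
          (s.1 ++ [PySem.Str.slice tailS (some s.2.2) (some i)], s.2.1, i + 1)
        else s) ([], 0, 0)
    = (PySem.List.enumerate tailS.toList 0).foldl (pvF tailS.toList) ([], 0, 0) := by
  rw [PySem.List.enumerate_eq_map_pyRange tailS.toList ' ', List.foldl_map]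
  rw [show PySem.Str.len tailS = PySem.List.len tailS.toList from rfl]
  congr 1


theorem core_eq (tail : String) :
    (let st := (PySem.List.pyRange 0 (PySem.Str.len tail) 1).foldl
        (fun (s : List String × Int × Int) i =>
          if (PySem.Str.pyGet? tail i).getD ' ' == '(' then (s.1, s.2.1 + 1, s.2.2)
          else if (PySem.Str.pyGet? tail i).getD ' ' == ')' then (s.1, s.2.1 - 1, s.2.2)
          else if (PySem.Str.pyGet? tail i).getD ' ' == ',' && s.2.1 == 0 then
            (s.1 ++ [PySem.Str.slice tail (some s.2.2) (some i)], s.2.1, i + 1)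
          else s) ([], 0, 0)
     (st.1 ++ [PySem.Str.slice tail (some st.2.2) none]).map PySem.Str.strip)
    = (let st := ((PySem.Str.split? tail ",").getD []).foldl
        (fun (s : List String × List String × Int) piece =>
          let buf := s.2.1 ++ [piece]
          let depth := s.2.2 + (PySem.Str.count piece "(" : Int) - (PySem.Str.count piece ")" : Int)
          if depth == 0 then (s.1 ++ [PySem.Str.strip (PySem.Str.join "," buf)], [], depth)
          else (s.1, buf, depth)) ([], [], 0)
       if st.2.1 ≠ [] then st.1 ++ [PySem.Str.strip (PySem.Str.join "," st.2.1)] else st.1) := by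
  dsimp only
  rw [A_bridge tail]
  have hstrip : ∀ l : List Char, PySem.Str.strip (String.ofList l)
      = String.ofList (PySem.Chars.strip l) := by
    intro l; rw [PySem.Str.strip, String.toList_ofList]
  have hA := A_enum tail.toList tail.toList [] [] 0 (by simp) (by simp)
  dsimp only at hA
  simp only [List.length_nil, Nat.cast_zero, List.drop_nil, pvBal_nil, List.nil_append] at hA
  rw [show ∀ a b : Option Int, PySem.Str.slice tail a b
        = String.ofList (PySem.List.slice tail.toList a b) by
      intro a b; rw [PySem.Str.slice]; simp]
  rw [hA, List.map_map]
  have hpieces : (PySem.Str.split? tail ",").getD []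
      = (pvSplit tail.toList []).map String.ofList := by
    rw [PySem.Str.split?, show ("," : String).toList = [','] from rfl, PySem.Chars.split?]
    simp [splitOn_comma]
  rw [hpieces]
  have hBm := B_map (pvSplit tail.toList []) [] [] 0
  simp only [List.map_nil] at hBm
  rw [hBm]
  have hjoin : ∀ bufc : List (List Char),
      PySem.Str.strip (PySem.Str.join "," (bufc.map String.ofList))
      = String.ofList (PySem.Chars.strip (List.intercalate [','] bufc)) := by
    intro bufc
    rw [PySem.Str.strip, PySem.Str.toList_join]
    congr 1
    rw [show ("," : String).toList = [','] from rfl, PySem.Chars.join]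
    congr 1
    simp [List.map_map, Function.comp_def]
  have hB := B_gen tail.toList [] [] [] 0
  dsimp only at hB
  simp only [pvBal_nil, add_zero, List.nil_append,
    show List.intercalate [','] [([] : List Char)] = [] by
      simp [List.intercalate, List.intersperse]] at hB
  dsimp only
  rw [hjoin]
  simp only [ne_eq, List.map_eq_nil_iff] at hB ⊢
  rw [hB]
  simp [Function.comp_def, hstrip]

-- ===== VERDICT (by name: the statement is the Claim_ definition above) =====
set_option maxHeartbeats 1000000 in
theorem split_head_tail_spec : Claim_equal_split_head_tail := by
  intro rule _
  show split_head_tail rule = split_head_tail_alt rule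
  unfold split_head_tail split_head_tail_alt
  dsimp only
  by_cases h1 : (PySem.Str.find rule ":-" == -1) = true
  · rw [if_pos h1, if_pos h1]
  · rw [if_neg h1, if_neg h1]
    generalize PySem.Str.strip (PySem.Str.slice rule (some (PySem.Str.find rule ":-" + 2)) none) = t
    by_cases h2 : (t == "TRUE") = true
    · rw [if_pos h2, if_pos h2]
    · rw [if_neg h2, if_neg h2]
      congr 1
      exact core_eq t
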